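-- pv_equiv track=rewrite | github.com/GeoStat-Framework/ogs5py | ogs5py/tools/tools.py | find_key_in_list
-- ===== SOURCE A (Python) =====
-- def find_key_in_list(key, key_list):
--     """
--     Look for the right corresponding key in a list.
--
--     key has to start with an given key from the list and the longest key
--     will be returned.
--
--     Parameters
--     ----------
--     key : str
--         Given key.
--     key_list : list of str
--         Valid keys to be checked against.
--
--     Returns
--     -------
--     found_key : :class:`str` or :class:`None`
--         The best match. None if nothing was found.
--     """
--     found = []
--     for try_key in key_list:
--         if key.startswith(try_key):
--             found.append(try_key)
--     if found:
--         found_key = max(found, key=len)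
--         # "" would be allowed for any given key
--         if found_key:
--             return found_key
--     return None
-- ===== SOURCE B (Python) =====
-- def find_key_in_list(key, key_list):
--     """Longest non-empty key from key_list that is a prefix of key; None if none."""
--     key_set = set(key_list)
--     lengths = sorted({len(k) for k in key_set if 0 < len(k) <= len(key)}, reverse=True)
--     for n in lengths:
--         if key[:n] in key_set:
--             return key[:n]
--     return None
-- ===== Notes on version B (the rewrite author's own statement) =====
-- stated objective: alternative
-- what changed: B builds a set of key_list once and probes key's prefixes at the distinct candidate lengths occurring in key_list, longest first, returning on the first set hit, instead of running startswith over the whole list and taking max by length.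
import Mathlib
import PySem

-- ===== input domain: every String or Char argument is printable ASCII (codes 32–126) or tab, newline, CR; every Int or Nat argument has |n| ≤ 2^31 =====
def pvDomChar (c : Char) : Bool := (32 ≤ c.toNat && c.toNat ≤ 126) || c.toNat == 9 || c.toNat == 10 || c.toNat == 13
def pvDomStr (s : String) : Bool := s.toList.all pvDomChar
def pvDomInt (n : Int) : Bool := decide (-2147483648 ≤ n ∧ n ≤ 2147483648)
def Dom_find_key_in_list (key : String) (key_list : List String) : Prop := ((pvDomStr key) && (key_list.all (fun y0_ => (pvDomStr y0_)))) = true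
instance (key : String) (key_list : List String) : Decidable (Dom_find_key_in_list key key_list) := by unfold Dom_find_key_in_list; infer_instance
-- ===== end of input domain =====

-- B probes key's prefixes of the candidate lengths occurring in key_list, longest first,
-- against a set built from key_list, instead of scanning key_list with startswith and
-- taking the max by length (objective: idiomatic).

-- ===== PORT A =====
def find_key_in_list (key : String) (key_list : List String) : Option String :=
  let found := key_list.foldl (fun acc try_key =>
    if PySem.Str.startswith key try_key then acc ++ [try_key] else acc) []
  match PySem.List.max? found (fun s => PySem.Str.len s) with
  | some found_key => if found_key ≠ "" then some found_key else none
  | none => none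

-- ===== PORT B =====
def find_key_in_list_alt_go (key : String) (keySet : PySem.Set String) : List Int → Option String
  | [] => none
  | n :: rest =>
      if keySet.contains (PySem.Str.slice key none (some n)) then
        some (PySem.Str.slice key none (some n))
      else find_key_in_list_alt_go key keySet rest

def find_key_in_list_alt (key : String) (key_list : List String) : Option String :=
  let keySet : PySem.Set String := PySem.Set.ofList key_list
  let lengths : List Int := PySem.List.sorted
    (PySem.Set.ofList ((keySet.filter (fun k =>
        decide (0 < PySem.Str.len k) && decide (PySem.Str.len k ≤ PySem.Str.len key))).map
      (fun k => PySem.Str.len k)))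
    (fun x => x) true
  find_key_in_list_alt_go key keySet lengths

-- ===== PRECONDITION & SPEC =====
def Spec_find_key_in_list (key : String) (key_list : List String) (out : Option String) : Prop := out = find_key_in_list_alt key key_list
instance (key : String) (key_list : List String) (out : Option String) : Decidable (Spec_find_key_in_list key key_list out) := by unfold Spec_find_key_in_list; infer_instance

-- ===== CLAIM (what is proved, stated in full; the proofs are below) =====
def Claim_equal_find_key_in_list : Prop := ∀ (key : String) (key_list : List String), Dom_find_key_in_list key key_list → Spec_find_key_in_list key key_list (find_key_in_list key key_list)

-- ===== LEMMAS AND PROOFS =====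

theorem slice_take (key : String) (i : Int) (h : 0 ≤ i) :
    (PySem.Str.slice key none (some i)).toList = key.toList.take i.toNat := by
  rw [PySem.Str.toList_slice, PySem.Chars.slice_eq_listSlice, PySem.List.slice_to _ h]

theorem contains_ofList_iff (xs : List String) (x : String) :
    (PySem.Set.ofList xs).contains x = true ↔ x ∈ xs := by
  simp [PySem.Set.contains, PySem.Set.mem_ofList]

theorem startswith_slice (key : String) (i : Int) (h : 0 ≤ i) :
    PySem.Str.startswith key (PySem.Str.slice key none (some i)) = true := by
  rw [PySem.Str.startswith_eq, PySem.Chars.startswith_iff, slice_take key i h]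
  exact List.take_prefix i.toNat key.toList

theorem len_slice (key : String) (i : Int) (h0 : 0 ≤ i) (hi : i ≤ (key.toList.length : Int)) :
    PySem.Str.len (PySem.Str.slice key none (some i)) = i := by
  have hgen : ∀ s : String, PySem.Str.len s = (s.toList.length : Int) := fun s => by simp
  rw [hgen, slice_take key i h0, List.length_take]
  omega

theorem go_none (key : String) (keySet : PySem.Set String) (L : List Int)
    (h : ∀ i ∈ L, keySet.contains (PySem.Str.slice key none (some i)) = false) :
    find_key_in_list_alt_go key keySet L = none := by
  induction L with
  | nil => rfl
  | cons a t ih =>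
      rw [find_key_in_list_alt_go, h a (List.mem_cons_self)]
      simp only [Bool.false_eq_true, if_false]
      exact ih (fun i hi => h i (List.mem_cons_of_mem a hi))

theorem go_some (key : String) (keySet : PySem.Set String) (L : List Int) (j : Int)
    (hjL : j ∈ L) (hsorted : L.Pairwise (· > ·))
    (hin : keySet.contains (PySem.Str.slice key none (some j)) = true)
    (habove : ∀ i ∈ L, j < i → keySet.contains (PySem.Str.slice key none (some i)) = false) :
    find_key_in_list_alt_go key keySet L = some (PySem.Str.slice key none (some j)) := by
  induction L with
  | nil => exact absurd hjL (List.not_mem_nil)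
  | cons a t ih =>
      rcases List.mem_cons.mp hjL with heq | htail
      · subst heq
        rw [find_key_in_list_alt_go, hin]
        simp
      · have haj : j < a := (List.pairwise_cons.mp hsorted).1 j htail
        rw [find_key_in_list_alt_go, habove a List.mem_cons_self haj]
        simp only [Bool.false_eq_true, if_false]
        exact ih htail (List.pairwise_cons.mp hsorted).2
          (fun i hi hji => habove i (List.mem_cons_of_mem a hi) hji)

-- Characterisation of the probe-length list of port B.
theorem mem_lengths_iff (key : String) (key_list : List String) (i : Int) :
    (i ∈ PySem.List.sorted
      (PySem.Set.ofList (((PySem.Set.ofList key_list).filter (fun k =>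
          decide (0 < PySem.Str.len k) && decide (PySem.Str.len k ≤ PySem.Str.len key))).map
        (fun k => PySem.Str.len k)))
      (fun x => x) true)
      ↔ ∃ k ∈ key_list, (0 < PySem.Str.len k ∧ PySem.Str.len k ≤ PySem.Str.len key) ∧ PySem.Str.len k = i := by
  rw [PySem.List.mem_sorted, PySem.Set.mem_ofList]
  simp only [List.mem_map, List.mem_filter, PySem.Set.mem_ofList, Bool.and_eq_true, decide_eq_true_eq]
  constructor
  · rintro ⟨k, ⟨⟨hk, h1, h2⟩, h3⟩⟩; exact ⟨k, hk, ⟨h1, h2⟩, h3⟩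
  · rintro ⟨k, hk, ⟨h1, h2⟩, h3⟩; exact ⟨k, ⟨⟨hk, h1, h2⟩, h3⟩⟩

theorem lengths_pairwise_gt (key : String) (key_list : List String) :
    (PySem.List.sorted
      (PySem.Set.ofList (((PySem.Set.ofList key_list).filter (fun k =>
          decide (0 < PySem.Str.len k) && decide (PySem.Str.len k ≤ PySem.Str.len key))).map
        (fun k => PySem.Str.len k)))
      (fun x => x) true).Pairwise (· > ·) := by
  have h1 := PySem.List.sorted_pairwise_rev
    (xs := PySem.Set.ofList (((PySem.Set.ofList key_list).filter (fun k =>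
        decide (0 < PySem.Str.len k) && decide (PySem.Str.len k ≤ PySem.Str.len key))).map
      (fun k => PySem.Str.len k)))
    (key := fun x => x)
  have h2 : (PySem.List.sorted
      (PySem.Set.ofList (((PySem.Set.ofList key_list).filter (fun k =>
          decide (0 < PySem.Str.len k) && decide (PySem.Str.len k ≤ PySem.Str.len key))).map
        (fun k => PySem.Str.len k)))
      (fun x => x) true).Nodup :=
    (PySem.List.sorted_perm _ _ _).nodup_iff.mpr (PySem.Set.nodup_ofList _)
  exact (h1.and h2).imp (fun {a b} hab => by
    rcases hab with ⟨hle, hne⟩; omega)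

-- ===== VERDICT (by name: the statement is the Claim_ definition above) =====
theorem find_key_in_list_spec : Claim_equal_find_key_in_list := by
  intro key key_list _hdom
  show find_key_in_list key key_list = find_key_in_list_alt key key_list
  simp only [find_key_in_list, find_key_in_list_alt]
  rw [PySem.List.foldl_append_if_eq_filter, List.nil_append]
  set p := fun t => PySem.Str.startswith key t with hp
  have hlenkey : PySem.Str.len key = (key.toList.length : Int) := by simp
  cases hmax : PySem.List.max? (key_list.filter p) (fun s => PySem.Str.len s) with
  | none =>
      have hf : key_list.filter p = [] := (PySem.List.max?_eq_none_iff _ _).mp hmax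
      refine (go_none key _ _ ?_).symm
      intro i hiL
      rcases (mem_lengths_iff key key_list i).mp hiL with ⟨k, _hk, ⟨h1, _h2⟩, h3⟩
      have hi0 : 0 ≤ i := by omega
      rw [Bool.eq_false_iff]
      intro hc
      have hmem : PySem.Str.slice key none (some i) ∈ key_list :=
        (contains_ofList_iff _ _).mp hc
      have : PySem.Str.slice key none (some i) ∈ key_list.filter p :=
        List.mem_filter.mpr ⟨hmem, startswith_slice key i hi0⟩
      rw [hf] at this; exact absurd this (List.not_mem_nil)
  | some fk =>
      have hmemf : fk ∈ key_list.filter p := PySem.List.max?_mem hmax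
      have hmem : fk ∈ key_list := (List.mem_filter.mp hmemf).1
      have hpre : fk.toList <+: key.toList := by
        have hsw' : PySem.Str.startswith key fk = true := (List.mem_filter.mp hmemf).2
        rw [PySem.Str.startswith_eq, PySem.Chars.startswith_iff] at hsw'
        exact hsw'
      have hmax' := PySem.List.max?_isMax hmax
      have hlenfk : PySem.Str.len fk = (fk.toList.length : Int) := by simp
      by_cases hfk : fk = ""
      · subst hfk
        simp only [ne_eq, not_true_eq_false, if_false]
        refine (go_none key _ _ ?_).symm
        intro i hiL
        rcases (mem_lengths_iff key key_list i).mp hiL with ⟨k, _hk, ⟨h1, h2⟩, h3⟩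
        have hi0 : 0 ≤ i := by omega
        rw [Bool.eq_false_iff]
        intro hc
        have hmem2 : PySem.Str.slice key none (some i) ∈ key_list :=
          (contains_ofList_iff _ _).mp hc
        have hmemf2 : PySem.Str.slice key none (some i) ∈ key_list.filter p :=
          List.mem_filter.mpr ⟨hmem2, startswith_slice key i hi0⟩
        have hle := hmax' _ hmemf2
        rw [len_slice key i hi0 (by rw [hlenkey] at h2; omega)] at hle
        have hz : PySem.Str.len "" = (0 : Int) := by simp
        rw [hz] at hle
        omega
      · simp only [ne_eq, hfk, not_false_eq_true, if_true]
        set j := PySem.Str.len fk with hj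
        have hj0 : 0 ≤ j := by rw [hlenfk]; omega
        have hj1 : 1 ≤ j := by
          rw [hlenfk]
          rcases Nat.eq_zero_or_pos fk.toList.length with h0 | h1
          · exact absurd (by rw [← String.toList_inj]; simp [List.eq_nil_of_length_eq_zero h0]) hfk
          · omega
        have hjn : j ≤ (key.toList.length : Int) := by
          rw [hlenfk]; exact_mod_cast hpre.length_le
        have hslice : PySem.Str.slice key none (some j) = fk := by
          rw [← String.toList_inj, slice_take key j hj0]
          have : j.toNat = fk.toList.length := by rw [hlenfk]; omega
          rw [this]
          exact (List.prefix_iff_eq_take.mp hpre).symm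
        refine (Eq.trans (go_some key _ _ j ?_ (lengths_pairwise_gt key key_list) ?_ ?_)
          (by rw [hslice])).symm
        · exact (mem_lengths_iff key key_list j).mpr
            ⟨fk, hmem, ⟨by omega, by rw [hlenkey]; omega⟩, rfl⟩
        · rw [hslice]; exact (contains_ofList_iff _ _).mpr hmem
        · intro i hiL hji
          rcases (mem_lengths_iff key key_list i).mp hiL with ⟨k, _hk, ⟨h1, h2⟩, h3⟩
          have hi0 : 0 ≤ i := by omega
          rw [Bool.eq_false_iff]
          intro hc
          have hmem2 : PySem.Str.slice key none (some i) ∈ key_list :=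
            (contains_ofList_iff _ _).mp hc
          have hmemf2 : PySem.Str.slice key none (some i) ∈ key_list.filter p :=
            List.mem_filter.mpr ⟨hmem2, startswith_slice key i hi0⟩
          have hle := hmax' _ hmemf2
          rw [len_slice key i hi0 (by rw [hlenkey] at h2; omega)] at hle
          omega
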